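-- pv_equiv track=rewrite | github.com/Gauravrandheer/Sabudh_Assignment | SabudhKnn/KnnAlgo.py | getResponse
-- ===== SOURCE A (Python) =====
-- import operator
--
-- def getResponse(neighbors):
--     rep = {}
--     for x in range(len(neighbors)):
--         response = neighbors[x][-1]
--         if response in rep:
--             rep[response] += 1
--         else:
--             rep[response] = 1
--     sortedVotes = sorted(rep.items(), key=operator.itemgetter(1), reverse=True)
--     return sortedVotes[0][0]
-- ===== SOURCE B (Python) =====
-- def getResponse(neighbors):
--     labels = [n[-1] for n in neighbors]
--     best = labels[0]
--     for lab in labels: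
--         if labels.count(lab) > labels.count(best):
--             best = lab
--     return best
-- ===== Notes on version B (the rewrite author's own statement) =====
-- stated objective: simpler
-- what changed: B drops A's count dictionary and its sort entirely: it builds the label list and keeps the current best label, replacing it only when a label's labels.count is strictly larger (appearance order reproduces A's first-insertion tie-break); Pre_ excludes only the inputs where A raises IndexError (empty neighbor list or an empty row), where B raises too.
import Mathlib
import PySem

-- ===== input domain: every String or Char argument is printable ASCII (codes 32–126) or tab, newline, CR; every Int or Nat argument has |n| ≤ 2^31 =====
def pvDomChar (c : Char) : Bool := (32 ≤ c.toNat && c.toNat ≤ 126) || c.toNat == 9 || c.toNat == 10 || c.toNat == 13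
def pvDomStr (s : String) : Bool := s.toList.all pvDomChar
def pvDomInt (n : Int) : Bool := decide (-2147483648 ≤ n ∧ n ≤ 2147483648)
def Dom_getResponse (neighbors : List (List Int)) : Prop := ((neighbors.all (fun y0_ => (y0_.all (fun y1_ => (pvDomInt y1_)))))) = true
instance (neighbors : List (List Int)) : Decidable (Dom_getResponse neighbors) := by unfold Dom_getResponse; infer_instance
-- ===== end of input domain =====

-- B drops A's count dictionary and sort: it scans the label list in order, keeping the
-- current best and replacing it only on a strictly larger labels.count — objective: simpler.

-- ===== PORT A =====
def getResponse (neighbors : List (List Int)) : Int :=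
  let rep : PySem.Dict Int Int :=
    (PySem.List.pyRange 0 (PySem.List.len neighbors) 1).foldl
      (fun d x =>
        let response := PySem.List.pyGetD (PySem.List.pyGetD neighbors x []) (-1) 0
        if d.contains response then d.insert response (d.getD response 0 + 1)
        else d.insert response 1)
      PySem.Dict.empty
  let sortedVotes := PySem.List.sorted rep.items (fun p => p.2) true
  (PySem.List.pyGetD sortedVotes 0 (0, 0)).1

-- ===== PORT B =====
def getResponse_alt (neighbors : List (List Int)) : Int :=
  let labels := neighbors.map (fun n => PySem.List.pyGetD n (-1) 0)
  let best := PySem.List.pyGetD labels 0 0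
  labels.foldl (fun best lab => if labels.count lab > labels.count best then lab else best) best

-- ===== PRECONDITION & SPEC =====
-- Pre_ excludes exactly the inputs on which the Python A raises IndexError:
-- an empty neighbor list (sortedVotes[0]) or an empty row (neighbors[x][-1]).
def Pre_getResponse (neighbors : List (List Int)) : Prop :=
  neighbors ≠ [] ∧ ∀ r ∈ neighbors, r ≠ []
instance (neighbors : List (List Int)) : Decidable (Pre_getResponse neighbors) := by
  unfold Pre_getResponse; infer_instance

def pvWitness_getResponse : List (List Int) := [[1, 2], [0, 3], [4, 2]]

def Spec_getResponse (neighbors : List (List Int)) (out : Int) : Prop := out = getResponse_alt neighbors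
instance (neighbors : List (List Int)) (out : Int) : Decidable (Spec_getResponse neighbors out) := by
  unfold Spec_getResponse; infer_instance

-- ===== CLAIM (what is proved, stated in full; the proofs are below) =====
def Claim_equal_getResponse : Prop := ∀ (neighbors : List (List Int)), Dom_getResponse neighbors → Pre_getResponse neighbors → Spec_getResponse neighbors (getResponse neighbors)

-- ===== LEMMAS AND PROOFS =====

-- Python's max accumulator step (strict improvement keeps the first extremal element).
def maxStep {α κ : Type} [LinearOrder κ] (key : α → κ) (acc : Option α) (x : α) : Option α :=
  match acc with
  | none => some x
  | some m => if key m < key x then some x else some m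

theorem max?_eq_foldl {α κ : Type} [LinearOrder κ] (xs : List α) (key : α → κ) :
    PySem.List.max? xs key = xs.foldl (maxStep key) none := by
  unfold PySem.List.max?
  exact PySem.List.foldl_congr_mem _ _ _ _ (fun acc x _ => by cases acc <;> rfl)

-- A's counting branch is one dict update.
theorem counter_step (d : PySem.Dict Int Int) (v : Int) :
    (if d.contains v then d.insert v (d.getD v 0 + 1) else d.insert v 1)
      = d.insert v (d.getD v 0 + 1) := by
  by_cases h : d.contains v
  · simp [h]
  · simp [h, PySem.Dict.getD_of_not_contains d 0 (by simpa using h)]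

-- head of a stable reverse sort is Python's max (first extremal element).
theorem head_sorted_rev {α κ : Type} [LinearOrder κ] (xs : List α) (key : α → κ) :
    (PySem.List.sorted xs key true).head? = PySem.List.max? xs key := by
  rw [PySem.List.sorted_rev_eq_foldl_insertBy, max?_eq_foldl]
  induction xs using List.reverseRecOn with
  | nil => rfl
  | append_singleton l x ih =>
    rw [List.foldl_append, List.foldl_append, List.foldl_cons, List.foldl_nil,
        List.foldl_cons, List.foldl_nil, ← ih]
    cases h : List.foldl
        (fun acc x => PySem.List.insertBy (fun a b => decide (key b < key a)) x acc) [] l with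
    | nil => simp [PySem.List.insertBy, maxStep]
    | cons y ys =>
      by_cases hxy : key y < key x <;> simp [PySem.List.insertBy, maxStep, hxy]

-- max? through a map.
theorem max?_map {α β κ : Type} [LinearOrder κ] (f : α → β) (key : β → κ) (l : List α) :
    PySem.List.max? (l.map f) key = (PySem.List.max? l (fun a => key (f a))).map f := by
  rw [max?_eq_foldl, max?_eq_foldl, List.foldl_map]
  suffices h : ∀ (acc : Option α),
      l.foldl (fun a x => maxStep key a (f x)) (acc.map f)
        = (l.foldl (maxStep (fun a => key (f a))) acc).map f by
    simpa using h none
  intro acc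
  induction l generalizing acc with
  | nil => rfl
  | cons x t ih =>
    rw [List.foldl_cons, List.foldl_cons]
    cases acc with
    | none => exact ih (some x)
    | some m =>
      simp only [Option.map, maxStep]
      split_ifs <;> [exact ih (some x); exact ih (some m)]

-- max? is unchanged by first-occurrence deduplication (the key depends only on the value).
theorem max?_set_fold {κ : Type} [LinearOrder κ] (c : Int → κ) (l : List Int) (s : PySem.Set Int) :
    PySem.List.max? (l.foldl PySem.Set.add s) c
      = l.foldl (maxStep c) (PySem.List.max? s c) := by
  induction l generalizing s with
  | nil => rfl
  | cons x t ih =>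
    rw [List.foldl_cons, List.foldl_cons, ih]
    congr 1
    by_cases hmem : x ∈ s
    · have hadd : PySem.Set.add s x = s := by
        simp [PySem.Set.add, PySem.Set.contains, hmem]
      rw [hadd]
      cases hm : PySem.List.max? s c with
      | none =>
        rw [(PySem.List.max?_eq_none_iff s c).mp hm] at hmem
        exact absurd hmem (List.not_mem_nil)
      | some m =>
        have hle := PySem.List.max?_isMax hm x hmem
        simp [maxStep, not_lt_of_ge hle]
    · have hadd : PySem.Set.add s x = s ++ [x] := by
        simp [PySem.Set.add, PySem.Set.contains, hmem]
      rw [hadd, max?_eq_foldl, max?_eq_foldl, List.foldl_append, List.foldl_cons, List.foldl_nil]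

-- folding Python's max step from a some-accumulator.
theorem max_fold_some {κ : Type} [LinearOrder κ] (key : Int → κ) (t : List Int) (b : Int) :
    t.foldl (maxStep key) (some b)
      = some (t.foldl (fun m x => if key m < key x then x else m) b) := by
  induction t generalizing b with
  | nil => rfl
  | cons x t ih =>
    rw [List.foldl_cons, List.foldl_cons]
    simp only [maxStep]
    split_ifs <;> apply ih

-- x[0] with a default is head-or-default.
theorem pyGetD_zero_head {α : Type} (xs : List α) (d : α) :
    PySem.List.pyGetD xs 0 d = (xs.head?).getD d := by
  cases xs <;> simp [PySem.List.pyGetD, PySem.List.pyGet?, PySem.List.pyIdx?]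

-- A's index loop builds exactly Counter(labels).
theorem a_fold_counter (neighbors : List (List Int)) :
    (PySem.List.pyRange 0 (PySem.List.len neighbors) 1).foldl
      (fun (d : PySem.Dict Int Int) x =>
        let response := PySem.List.pyGetD (PySem.List.pyGetD neighbors x []) (-1) 0
        if d.contains response then d.insert response (d.getD response 0 + 1)
        else d.insert response 1) PySem.Dict.empty
      = PySem.Dict.counter (neighbors.map (fun n => PySem.List.pyGetD n (-1) 0)) := by
  rw [PySem.List.foldl_congr_mem _ _
      (fun (d : PySem.Dict Int Int) x =>
        d.insert (PySem.List.pyGetD (PySem.List.pyGetD neighbors x []) (-1) 0)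
          (d.getD (PySem.List.pyGetD (PySem.List.pyGetD neighbors x []) (-1) 0) 0 + 1))
      PySem.Dict.empty (fun acc x _ => counter_step acc _)]
  rw [← PySem.Dict.foldl_insert_getD_add_one_eq_counter]
  conv_rhs => rw [← PySem.List.map_pyGetD_pyRange_zero neighbors []]
  rw [List.foldl_map, List.foldl_map]

-- the two ports agree on every input (both return 0 on the inputs Python rejects).
theorem ports_agree (neighbors : List (List Int)) :
    getResponse neighbors = getResponse_alt neighbors := by
  unfold getResponse getResponse_alt
  simp only [a_fold_counter, PySem.Dict.items_counter, pyGetD_zero_head, head_sorted_rev]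
  rw [max?_map
        (fun k => (k, (List.count k (neighbors.map (fun n => PySem.List.pyGetD n (-1) 0)) : Int)))
        (fun p => p.2) _,
      PySem.Set.ofList_eq_foldl, max?_set_fold]
  generalize neighbors.map (fun n => PySem.List.pyGetD n (-1) 0) = labels
  cases labels with
  | nil => rfl
  | cons l0 t =>
    rw [show PySem.List.max? ([] : List Int)
          (fun a => ((a, (List.count a (l0 :: t) : Int)).2)) = none from rfl]
    rw [List.foldl_cons,
        show maxStep (fun a => (List.count a (l0 :: t) : Int)) none l0 = some l0 from rfl,
        max_fold_some]
    simp only [Option.map_some, Option.getD_some, List.head?_cons, List.foldl_cons, gt_iff_lt,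
      lt_irrefl, ite_self]
    exact PySem.List.foldl_congr_mem t _
      (fun best lab => if List.count best (l0 :: t) < List.count lab (l0 :: t) then lab else best)
      l0 (fun acc x _ => by simp [Nat.cast_lt])

-- ===== VERDICT (by name: the statement is the Claim_ definition above) =====
theorem getResponse_spec : Claim_equal_getResponse := by
  intro neighbors _ _
  unfold Spec_getResponse
  exact ports_agree neighbors
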